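-- pv_equiv track=rewrite | github.com/Muhammad-Hashir-55/Leetcode-Problem-Solving-and-Solutions | Convert_Integer_to_the_Sum_of_Two_No_Zero_Integers.py | getNoZeroIntegers
-- ===== SOURCE A (Python) =====
-- from typing import List
--
-- def getNoZeroIntegers(n: int) -> List[int]:
--     for i in range(n):
--         for j in range(n):
--             s1 = str(i)
--             s2 = str(j)
--             if('0' in s1):
--                 continue
--             if('0' in s2):
--                 continue
--             if(i +j == n):
--                 return [i,j]
-- ===== SOURCE B (Python) =====
-- def getNoZeroIntegers(n: int):
--     for i in range(1, n):
--         if '0' not in str(i) and '0' not in str(n - i):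
--             return [i, n - i]
-- ===== Notes on version B (the rewrite author's own statement) =====
-- stated objective: faster
-- what changed: A runs a nested n-by-n scan over all pairs (i, j) and tests i + j == n; B runs a single loop over i = 1..n-1 and checks i and n - i directly, so the inner scan disappears. Pre_ excludes the small n with no no-zero split (such as 1), on which A returns None (not a value of the declared list type); B also returns None there.
-- outside the precondition, e.g. on getNoZeroIntegers(1): A returns None, B returns None; on getNoZeroIntegers(0): A returns None, B returns None
import Mathlib
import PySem

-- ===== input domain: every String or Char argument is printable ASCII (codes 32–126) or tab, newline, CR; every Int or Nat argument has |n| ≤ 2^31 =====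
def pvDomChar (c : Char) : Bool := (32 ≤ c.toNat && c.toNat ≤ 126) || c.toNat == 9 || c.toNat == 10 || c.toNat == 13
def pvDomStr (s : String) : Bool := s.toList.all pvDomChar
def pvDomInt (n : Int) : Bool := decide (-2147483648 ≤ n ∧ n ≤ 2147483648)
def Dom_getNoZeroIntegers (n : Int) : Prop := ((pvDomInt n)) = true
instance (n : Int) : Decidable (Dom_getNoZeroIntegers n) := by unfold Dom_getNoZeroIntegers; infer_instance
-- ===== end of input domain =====

-- B replaces A's nested n×n scan over all pairs (i, j) by one loop over i checking i and n - i;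
-- return value only, objective: faster.

-- ===== PORT A =====
-- inner 'for j in range(n)'; early 'return [i,j]' modelled by Option, 'continue' by recursing
def pvInnerA (n i : Int) : List Int → Option (List Int)
  | [] => none
  | j :: js =>
    let s1 := PySem.Int.toStr i
    let s2 := PySem.Int.toStr j
    if PySem.Str.isIn "0" s1 then pvInnerA n i js
    else if PySem.Str.isIn "0" s2 then pvInnerA n i js
    else if i + j == n then some [i, j]
    else pvInnerA n i js

-- outer 'for i in range(n)'
def pvOuterA (n : Int) : List Int → Option (List Int)
  | [] => none
  | i :: is =>
    match pvInnerA n i (PySem.List.pyRange 0 n 1) with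
    | some r => some r
    | none => pvOuterA n is

-- falling off the loops returns Python None, which is outside Pre_; [] stands in for it
def getNoZeroIntegers (n : Int) : List Int :=
  (pvOuterA n (PySem.List.pyRange 0 n 1)).getD []

-- ===== PORT B =====
-- single 'for i in range(1, n)' checking i and n - i
def pvScanB (n : Int) : List Int → Option (List Int)
  | [] => none
  | i :: is =>
    if !PySem.Str.isIn "0" (PySem.Int.toStr i) && !PySem.Str.isIn "0" (PySem.Int.toStr (n - i)) then
      some [i, n - i]
    else pvScanB n is

def getNoZeroIntegers_alt (n : Int) : List Int :=
  (pvScanB n (PySem.List.pyRange 1 n 1)).getD []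

-- ===== PRECONDITION & SPEC =====
-- Pre_ excludes the small n with no no-zero split (such as 1), where both loops find no pair and the
-- Pythons return None, which is not a value of the declared type list[int]; all other n in Dom have one.
def Pre_getNoZeroIntegers (n : Int) : Prop := 2 ≤ n
instance (n : Int) : Decidable (Pre_getNoZeroIntegers n) := by unfold Pre_getNoZeroIntegers; infer_instance
def pvWitness_getNoZeroIntegers : Int := (11)
def Spec_getNoZeroIntegers (n : Int) (out : List Int) : Prop := out = getNoZeroIntegers_alt n
instance (n : Int) (out : List Int) : Decidable (Spec_getNoZeroIntegers n out) := by unfold Spec_getNoZeroIntegers; infer_instance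

-- ===== CLAIM (what is proved, stated in full; the proofs are below) =====
def Claim_equal_getNoZeroIntegers : Prop := ∀ (n : Int), Dom_getNoZeroIntegers n → Pre_getNoZeroIntegers n → Spec_getNoZeroIntegers n (getNoZeroIntegers n)

-- ===== LEMMAS AND PROOFS =====

-- abbreviation for the test A and B both perform
def pvHasZero (x : Int) : Bool := PySem.Str.isIn "0" (PySem.Int.toStr x)

-- the form the pysem bridge simp lemmas leave the test in
theorem pvHasZero_eq (x : Int) :
    PySem.Chars.isIn ['0'] (PySem.Int.toChars x) = pvHasZero x := by
  simp [pvHasZero]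

theorem pvInnerA_of_hasZero (n i : Int) (h : pvHasZero i = true) :
    ∀ js, pvInnerA n i js = none := by
  intro js
  induction js with
  | nil => rfl
  | cons j js ih => simpa [pvInnerA, pvHasZero_eq, h] using ih

theorem pvInnerA_of_noZero (n i : Int) (h : pvHasZero i = false) :
    ∀ js, pvInnerA n i js =
      if (n - i) ∈ js ∧ pvHasZero (n - i) = false then some [i, n - i] else none := by
  intro js
  induction js with
  | nil => simp [pvInnerA]
  | cons j js ih =>
    by_cases hj : pvHasZero j = true
    · rw [show pvInnerA n i (j :: js) = pvInnerA n i js by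
        simp [pvInnerA, pvHasZero_eq, h, hj], ih]
      by_cases hji : j = n - i
      · subst hji; simp [hj, List.mem_cons]
      · have hji' : n - i ≠ j := fun hc => hji hc.symm
        simp [List.mem_cons, hji']
    · have hj' : pvHasZero j = false := by simpa using hj
      by_cases hsum : i + j = n
      · have hji : j = n - i := by omega
        subst hji
        simp [pvInnerA, pvHasZero_eq, h, hj', hsum, List.mem_cons]
      · rw [show pvInnerA n i (j :: js) = pvInnerA n i js by
          simp [pvInnerA, pvHasZero_eq, h, hj', hsum], ih]
        have hji : n - i ≠ j := by omega
        simp [List.mem_cons, hji]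

theorem pvOuterA_eq_pvScanB (n : Int) :
    ∀ l : List Int, (∀ i ∈ l, 1 ≤ i ∧ i < n) → pvOuterA n l = pvScanB n l := by
  intro l hl
  induction l with
  | nil => rfl
  | cons i is ih =>
    have hi : 1 ≤ i ∧ i < n := hl i (List.mem_cons_self ..)
    have htail : ∀ x ∈ is, 1 ≤ x ∧ x < n := fun x hx => hl x (List.mem_cons_of_mem _ hx)
    by_cases hz : pvHasZero i = true
    · rw [pvOuterA, pvInnerA_of_hasZero n i hz]
      rw [show pvScanB n (i :: is) = pvScanB n is by simp [pvScanB, pvHasZero_eq, hz]]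
      exact ih htail
    · have hz' : pvHasZero i = false := by simpa using hz
      have hmem : (n - i) ∈ PySem.List.pyRange 0 n 1 := by
        rw [PySem.List.mem_pyRange_one]; omega
      rw [pvOuterA, pvInnerA_of_noZero n i hz']
      by_cases hnz : pvHasZero (n - i) = false
      · rw [if_pos ⟨hmem, hnz⟩]
        simp [pvScanB, pvHasZero_eq, hz', hnz]
      · have hnz' : pvHasZero (n - i) = true := by simpa using hnz
        rw [if_neg (by simp [hnz'])]
        rw [show pvScanB n (i :: is) = pvScanB n is by simp [pvScanB, pvHasZero_eq, hz', hnz']]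
        exact ih htail

theorem pvHasZero_zero : pvHasZero 0 = true := by decide

-- ===== VERDICT (by name: the statement is the Claim_ definition above) =====
theorem getNoZeroIntegers_spec : Claim_equal_getNoZeroIntegers := by
  intro n _ hpre
  have h2 : (2 : Int) ≤ n := hpre
  unfold Spec_getNoZeroIntegers getNoZeroIntegers getNoZeroIntegers_alt
  have hsplit : PySem.List.pyRange 0 n 1 = 0 :: PySem.List.pyRange 1 n 1 := by
    rw [PySem.List.pyRange_one_cons (by omega)]
    norm_num
  rw [hsplit, pvOuterA, pvInnerA_of_hasZero n 0 pvHasZero_zero,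
    pvOuterA_eq_pvScanB n _ (fun i hi => by
      rw [PySem.List.mem_pyRange_one] at hi; omega)]
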